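-- pv_equiv track=rewrite | github.com/mr-pyle/Tron-2026 | bots/Dio.py | count_adjacent_obstacles
-- ===== SOURCE A (Python) =====
-- def count_adjacent_obstacles(pos, board, grid_dim):
--     """Counts touching walls/trails to hug the perimeter."""
--     x, y = pos
--     obstacles = 0
--     for dx in [-1, 0, 1]:
--         for dy in [-1, 0, 1]:
--             if dx == 0 and dy == 0:
--                 continue
--             nx, ny = x + dx, y + dy
--             if not (0 <= nx < grid_dim and 0 <= ny < grid_dim) or (nx, ny) in board:
--                 obstacles += 1
--     return obstacles
-- ===== SOURCE B (Python) =====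
-- def count_adjacent_obstacles(pos, board, grid_dim):
--     """Counts touching walls/trails to hug the perimeter."""
--     x, y = pos
--     xlo, xhi = max(0, x - 1), min(grid_dim, x + 2)
--     ylo, yhi = max(0, y - 1), min(grid_dim, y + 2)
--     in_block = max(0, xhi - xlo) * max(0, yhi - ylo)
--     center_in = 1 if 0 <= x < grid_dim and 0 <= y < grid_dim else 0
--     obstacles = 8 - (in_block - center_in)
--     for nx in range(xlo, xhi):
--         for ny in range(ylo, yhi):
--             if (nx, ny) != (x, y) and (nx, ny) in board:
--                 obstacles += 1
--     return obstacles
-- ===== Notes on version B (the rewrite author's own statement) =====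
-- stated objective: alternative
-- what changed: Instead of scanning all 8 neighbor deltas and testing bounds for each, B counts out-of-bounds neighbors arithmetically from the clamped 3x3 block area (minus the in-bounds center) and loops only over the clamped in-bounds block to count board hits.
import Mathlib
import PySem

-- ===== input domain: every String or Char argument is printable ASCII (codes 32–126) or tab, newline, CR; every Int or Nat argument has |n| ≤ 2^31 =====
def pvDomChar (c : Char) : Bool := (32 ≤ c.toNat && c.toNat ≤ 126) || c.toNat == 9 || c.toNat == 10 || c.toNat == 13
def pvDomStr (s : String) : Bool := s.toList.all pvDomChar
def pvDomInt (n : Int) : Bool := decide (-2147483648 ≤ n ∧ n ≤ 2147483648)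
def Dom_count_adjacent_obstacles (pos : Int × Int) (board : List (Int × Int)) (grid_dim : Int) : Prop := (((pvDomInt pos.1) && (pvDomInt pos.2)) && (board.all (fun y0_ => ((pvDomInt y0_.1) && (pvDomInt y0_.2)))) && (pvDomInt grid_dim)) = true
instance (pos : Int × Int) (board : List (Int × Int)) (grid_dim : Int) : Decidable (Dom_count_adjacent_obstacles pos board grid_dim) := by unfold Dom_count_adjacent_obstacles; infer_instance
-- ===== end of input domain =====

-- B replaces the 8-delta scan with an arithmetic out-of-bounds count plus a loop over the
-- clamped in-bounds 3×3 block (objective: alternative decomposition, same cost).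

-- ===== PORT A =====
def count_adjacent_obstacles (pos : Int × Int) (board : List (Int × Int)) (grid_dim : Int) : Int :=
  [(-1 : Int), 0, 1].foldl (fun obstacles dx =>
    [(-1 : Int), 0, 1].foldl (fun obstacles dy =>
      if dx = 0 ∧ dy = 0 then obstacles
      else
        if ¬(0 ≤ pos.1 + dx ∧ pos.1 + dx < grid_dim ∧ 0 ≤ pos.2 + dy ∧ pos.2 + dy < grid_dim)
            ∨ (pos.1 + dx, pos.2 + dy) ∈ board then obstacles + 1
        else obstacles) obstacles) 0

-- ===== PORT B =====
def count_adjacent_obstacles_alt (pos : Int × Int) (board : List (Int × Int)) (grid_dim : Int) : Int :=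
  let x := pos.1
  let y := pos.2
  let xlo := max 0 (x - 1)
  let xhi := min grid_dim (x + 2)
  let ylo := max 0 (y - 1)
  let yhi := min grid_dim (y + 2)
  let inBlock := max 0 (xhi - xlo) * max 0 (yhi - ylo)
  let centerIn : Int := if 0 ≤ x ∧ x < grid_dim ∧ 0 ≤ y ∧ y < grid_dim then 1 else 0
  (PySem.List.pyRange xlo xhi 1).foldl (fun obstacles nx =>
    (PySem.List.pyRange ylo yhi 1).foldl (fun obstacles ny =>
      if (nx, ny) ≠ (x, y) ∧ (nx, ny) ∈ board then obstacles + 1 else obstacles) obstacles)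
    (8 - (inBlock - centerIn))

-- ===== PRECONDITION & SPEC =====
def Spec_count_adjacent_obstacles (pos : Int × Int) (board : List (Int × Int)) (grid_dim : Int) (out : Int) : Prop := out = count_adjacent_obstacles_alt pos board grid_dim
instance (pos : Int × Int) (board : List (Int × Int)) (grid_dim : Int) (out : Int) : Decidable (Spec_count_adjacent_obstacles pos board grid_dim out) := by unfold Spec_count_adjacent_obstacles; infer_instance

-- ===== CLAIM (what is proved, stated in full; the proofs are below) =====
def Claim_equal_count_adjacent_obstacles : Prop := ∀ (pos : Int × Int) (board : List (Int × Int)) (grid_dim : Int), Dom_count_adjacent_obstacles pos board grid_dim → Spec_count_adjacent_obstacles pos board grid_dim (count_adjacent_obstacles pos board grid_dim)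

-- ===== LEMMAS AND PROOFS =====

/-- 0/1 indicator of a decidable proposition. -/
def pvInd (p : Prop) [Decidable p] : Int := if p then 1 else 0

/-- The clamped range equals the in-bounds values among `v-1, v, v+1`. -/
lemma pvAxis (v g : Int) :
    PySem.List.pyRange (max 0 (v - 1)) (min g (v + 2)) 1
      = [v - 1, v, v + 1].filter (fun w => decide (0 ≤ w ∧ w < g)) := by
  have h1 : (PySem.List.pyRange (max 0 (v - 1)) (min g (v + 2)) 1).Pairwise (· < ·) :=
    PySem.List.pairwise_lt_pyRange_one _ _
  have h2 : ([v - 1, v, v + 1].filter (fun w => decide (0 ≤ w ∧ w < g))).Pairwise (· < ·) := by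
    apply List.Pairwise.filter
    simp
  have hmem : ∀ a : Int, a ∈ PySem.List.pyRange (max 0 (v - 1)) (min g (v + 2)) 1 ↔
      a ∈ [v - 1, v, v + 1].filter (fun w => decide (0 ≤ w ∧ w < g)) := by
    intro a
    simp [PySem.List.mem_pyRange_one, List.mem_filter]
    omega
  have hperm := (List.perm_ext_iff_of_nodup (h1.nodup) (h2.nodup)).2 hmem
  exact hperm.eq_of_pairwise (fun a b _ _ hab hba => (lt_asymm hab hba).elim) h1 h2

/-- The clamped block side length equals the sum of the three indicators. -/
lemma pvAxisLen (v g : Int) :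
    max 0 (min g (v + 2) - max 0 (v - 1))
      = pvInd (0 ≤ v - 1 ∧ v - 1 < g) + pvInd (0 ≤ v ∧ v < g) + pvInd (0 ≤ v + 1 ∧ v + 1 < g) := by
  unfold pvInd; split_ifs <;> omega

lemma pvFoldlInd {α : Type} (Q : α → Prop) [DecidablePred Q] :
    ∀ (l : List α) (s : Int),
      l.foldl (fun acc e => if Q e then acc + 1 else acc) s
        = s + (l.map (fun e => pvInd (Q e))).sum := by
  intro l
  induction l with
  | nil => intro s; simp
  | cons a t ih =>
    intro s
    simp only [List.foldl_cons, List.map_cons, List.sum_cons, ih]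
    unfold pvInd; split_ifs <;> ring

lemma pvMapFilterSum {α : Type} (p : α → Bool) (f : α → Int) :
    ∀ l : List α, ((l.filter p).map f).sum = (l.map (fun a => if p a then f a else 0)).sum := by
  intro l
  induction l with
  | nil => simp
  | cons a t ih =>
    by_cases h : p a <;> simp [h, ih]

lemma pvIteIndMul (p : Prop) [Decidable p] (t : Int) :
    (if p then t else 0) = pvInd p * t := by
  unfold pvInd; split_ifs <;> ring

lemma pvIndPairNe {x y a b : Int} (board : List (Int × Int)) (h : a ≠ x ∨ b ≠ y) :
    pvInd ((a, b) ≠ (x, y) ∧ (a, b) ∈ board) = pvInd ((a, b) ∈ board) := by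
  have hne : (a, b) ≠ (x, y) := by
    intro he
    rcases h with h | h <;> [exact h (congrArg Prod.fst he); exact h (congrArg Prod.snd he)]
  unfold pvInd; simp [hne]

lemma pvIndPairCenter (x y : Int) (board : List (Int × Int)) :
    pvInd ((x, y) ≠ (x, y) ∧ (x, y) ∈ board) = 0 := by
  unfold pvInd; simp

lemma pvATerm (g a b : Int) (board : List (Int × Int)) (s : Int) :
    (if ¬(0 ≤ a ∧ a < g ∧ 0 ≤ b ∧ b < g) ∨ (a, b) ∈ board then s + 1 else s)
      = s + 1 - pvInd (0 ≤ a ∧ a < g) * pvInd (0 ≤ b ∧ b < g)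
          + pvInd (0 ≤ a ∧ a < g) * pvInd (0 ≤ b ∧ b < g) * pvInd ((a, b) ∈ board) := by
  unfold pvInd
  by_cases h3 : (a, b) ∈ board <;> (simp [h3]; all_goals split_ifs <;> omega)

lemma pvCenterIn (x y g : Int) :
    pvInd (0 ≤ x ∧ x < g ∧ 0 ≤ y ∧ y < g)
      = pvInd (0 ≤ x ∧ x < g) * pvInd (0 ≤ y ∧ y < g) := by
  unfold pvInd; split_ifs <;> omega

-- ===== VERDICT (by name: the statement is the Claim_ definition above) =====
theorem count_adjacent_obstacles_spec : Claim_equal_count_adjacent_obstacles := by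
  intro pos board g _
  obtain ⟨x, y⟩ := pos
  unfold Spec_count_adjacent_obstacles count_adjacent_obstacles count_adjacent_obstacles_alt
  have e1 : x + -1 = x - 1 := by ring
  have e2 : y + -1 = y - 1 := by ring
  have e3 : x + 0 = x := by ring
  have e4 : y + 0 = y := by ring
  simp only [pvAxis, pvFoldlInd, PySem.List.foldl_add, pvMapFilterSum, pvAxisLen,
    List.foldl_cons, List.foldl_nil, List.map_cons, List.map_nil, List.sum_cons, List.sum_nil,
    decide_eq_true_eq, pvIteIndMul, pvATerm, e1, e2, e3, e4,
    Int.reduceEq, reduceIte, and_true, and_false]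
  simp only [pvIndPairNe (x := x) (y := y) (a := x - 1) (b := y - 1) board (Or.inl (by omega)),
    pvIndPairNe (x := x) (y := y) (a := x - 1) (b := y) board (Or.inl (by omega)),
    pvIndPairNe (x := x) (y := y) (a := x - 1) (b := y + 1) board (Or.inl (by omega)),
    pvIndPairNe (x := x) (y := y) (a := x) (b := y - 1) board (Or.inr (by omega)),
    pvIndPairNe (x := x) (y := y) (a := x) (b := y + 1) board (Or.inr (by omega)),
    pvIndPairNe (x := x) (y := y) (a := x + 1) (b := y - 1) board (Or.inl (by omega)),
    pvIndPairNe (x := x) (y := y) (a := x + 1) (b := y) board (Or.inl (by omega)),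
    pvIndPairNe (x := x) (y := y) (a := x + 1) (b := y + 1) board (Or.inl (by omega)),
    pvIndPairCenter x y board, pvCenterIn]
  ring
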